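-- pv_equiv track=rewrite | github.com/TofuMango/codetree-TILs | 240831/좌표평면 위의 특정 구역 2/specific-zone-above-the-2d-coordinate-2.py | min_area_excluding_one_point
-- ===== SOURCE A (Python) =====
-- def min_area_excluding_one_point(points):
--     n = len(points)
--     min_area = float('inf')  # 최소 넓이를 무한대로 초기화
--
--     for i in range(n):
--         # 현재 점을 제외한 나머지 점들
--         remaining_points = points[:i] + points[i+1:]
--
--         # 남은 점들의 x, y 좌표의 min, max 계산
--         x_coords = [point[0] for point in remaining_points]
--         y_coords = [point[1] for point in remaining_points]
--
--         x_min = min(x_coords)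
--         x_max = max(x_coords)
--         y_min = min(y_coords)
--         y_max = max(y_coords)
--
--         # 넓이 계산
--         if x_min == x_max or y_min == y_max:  # 같은 x 또는 y일 경우 넓이는 0
--             area = 0
--         else:
--             area = (x_max - x_min) * (y_max - y_min)
--
--         # 최소 넓이 업데이트
--         min_area = min(min_area, area)
--
--     return min_area
-- ===== SOURCE B (Python) =====
-- def min_area_excluding_one_point(points):
--     # One pass with suffix bounding-box stats + running prefix stats (O(n) instead of O(n^2)).
--     def unit(p):
--         return (p[0], p[0], p[1], p[1])
--
--     def combine(a, b):
--         if a is None: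
--             return b
--         if b is None:
--             return a
--         return (min(a[0], b[0]), max(a[1], b[1]), min(a[2], b[2]), max(a[3], b[3]))
--
--     # suf[i] = bounding-box stats of points[i:], built back to front
--     suf = [None]
--     for p in reversed(points):
--         suf.append(combine(unit(p), suf[-1]))
--     suf.reverse()
--
--     best = None
--     pre = None  # stats of the processed prefix
--     for p, s_next in zip(points, suf[1:]):
--         s = combine(pre, s_next)  # stats of all points except the current one
--         if s is not None:
--             x0, x1, y0, y1 = s
--             area = (x1 - x0) * (y1 - y0)
--             best = area if best is None else min(best, area)
--         pre = combine(pre, unit(p))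
--     return best
-- ===== Notes on version B (the rewrite author's own statement) =====
-- stated objective: faster
-- what changed: Replaces the per-index rebuild of the remaining list and four full min/max scans with a single pass combining precomputed suffix bounding-box stats with a running prefix, O(n) instead of O(n^2).
-- outside the precondition, e.g. on min_area_excluding_one_point([]): A returns inf, B returns None
import Mathlib
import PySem

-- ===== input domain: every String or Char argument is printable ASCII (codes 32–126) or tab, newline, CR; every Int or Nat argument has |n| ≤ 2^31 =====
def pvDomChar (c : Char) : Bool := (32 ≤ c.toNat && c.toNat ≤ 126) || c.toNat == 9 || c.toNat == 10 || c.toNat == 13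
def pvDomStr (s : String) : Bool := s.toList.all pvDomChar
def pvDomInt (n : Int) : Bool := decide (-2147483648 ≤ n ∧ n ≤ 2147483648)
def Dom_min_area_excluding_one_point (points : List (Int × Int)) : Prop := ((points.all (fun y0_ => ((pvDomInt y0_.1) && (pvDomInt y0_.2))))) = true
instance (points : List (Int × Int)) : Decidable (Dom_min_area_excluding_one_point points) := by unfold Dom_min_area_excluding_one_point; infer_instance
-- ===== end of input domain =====

-- B replaces A's per-index rebuild of the remaining list (four full min/max scans each) by one
-- pass combining precomputed suffix bounding-box stats with a running prefix.

-- ===== PORT A =====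
-- loop body of A's `for i in range(n)`
def pvAStep (points : List (Int × Int)) (acc : Option Int) (i : Int) : Option Int :=
  let remaining := PySem.List.slice points none (some i) ++ PySem.List.slice points (some (i + 1)) none
  let x_coords := remaining.map (fun point => point.1)
  let y_coords := remaining.map (fun point => point.2)
  -- Python's min/max raise on an empty list: the fall-through keeps acc (such inputs are outside Pre_)
  match PySem.List.min? x_coords (fun v => v), PySem.List.max? x_coords (fun v => v),
        PySem.List.min? y_coords (fun v => v), PySem.List.max? y_coords (fun v => v) with
  | some x_min, some x_max, some y_min, some y_max =>
    let area : Int := if x_min == x_max || y_min == y_max then 0 else (x_max - x_min) * (y_max - y_min)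
    some (match acc with | none => area | some m => min m area)
  | _, _, _, _ => acc

def min_area_excluding_one_point (points : List (Int × Int)) : Int :=
  let n : Int := points.length
  -- min_area starts at float('inf'), modelled as none; .getD 0 totalizes the return (under Pre_ it is some)
  ((PySem.List.pyRange 0 n 1).foldl (pvAStep points) none).getD 0

-- ===== PORT B =====
def pvUnit (p : Int × Int) : Int × Int × Int × Int := (p.1, p.1, p.2, p.2)

def pvCombine : Option (Int × Int × Int × Int) → Option (Int × Int × Int × Int) → Option (Int × Int × Int × Int)
  | none, b => b
  | a, none => a
  | some (a0, a1, a2, a3), some (b0, b1, b2, b3) => some (min a0 b0, max a1 b1, min a2 b2, max a3 b3)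

-- B's suffix-stats list `suf` (built back to front, Source B's reversed loop = foldr)
def pvSufList (l : List (Int × Int)) : List (Option (Int × Int × Int × Int)) :=
  l.foldr (fun p acc => pvCombine (some (pvUnit p)) (acc.headD none) :: acc) [none]

-- loop body of B's `for p, s_next in zip(points, suf[1:])`
def pvBStep (st : Option Int × Option (Int × Int × Int × Int))
    (pi : (Int × Int) × Option (Int × Int × Int × Int)) :
    Option Int × Option (Int × Int × Int × Int) :=
  let s := pvCombine st.2 pi.2
  let best := match s with
    | none => st.1
    | some (x0, x1, y0, y1) =>
      let area := (x1 - x0) * (y1 - y0)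
      some (match st.1 with | none => area | some b => min b area)
  (best, pvCombine st.2 (some (pvUnit pi.1)))

def min_area_excluding_one_point_alt (points : List (Int × Int)) : Int :=
  let sufs := pvSufList points
  ((((points.zip sufs.tail).foldl pvBStep (none, none)).1).getD 0)

-- ===== PRECONDITION & SPEC =====
-- Pre_ excludes points of length 0 (A returns float('inf'), a float, not an int; B returns None)
-- and of length 1 (Python's min of an empty list raises ValueError in A).
def Pre_min_area_excluding_one_point (points : List (Int × Int)) : Prop := 2 ≤ points.length
instance (points : List (Int × Int)) : Decidable (Pre_min_area_excluding_one_point points) := by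
  unfold Pre_min_area_excluding_one_point; infer_instance

def pvWitness_min_area_excluding_one_point : (List (Int × Int)) := [(0, 0), (3, 4), (1, 1)]

def Spec_min_area_excluding_one_point (points : List (Int × Int)) (out : Int) : Prop := out = min_area_excluding_one_point_alt points
instance (points : List (Int × Int)) (out : Int) : Decidable (Spec_min_area_excluding_one_point points out) := by unfold Spec_min_area_excluding_one_point; infer_instance

-- ===== CLAIM (what is proved, stated in full; the proofs are below) =====
def Claim_equal_min_area_excluding_one_point : Prop := ∀ (points : List (Int × Int)), Dom_min_area_excluding_one_point points → Pre_min_area_excluding_one_point points → Spec_min_area_excluding_one_point points (min_area_excluding_one_point points)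

-- ===== LEMMAS AND PROOFS =====

-- bounding-box stats of a list, as B's running prefix computes them
def pvStats (l : List (Int × Int)) : Option (Int × Int × Int × Int) :=
  l.foldl (fun s p => pvCombine s (some (pvUnit p))) none

-- the per-excluded-point best update both loops perform, abstracted over the stats of the rest
def pvBestStep (acc : Option Int) (s : Option (Int × Int × Int × Int)) : Option Int :=
  match s with
  | none => acc
  | some (x0, x1, y0, y1) =>
    some (match acc with | none => (x1 - x0) * (y1 - y0) | some b => min b ((x1 - x0) * (y1 - y0)))

-- the sequence of stats-of-all-but-one that the loops walk through
def pvCombos (pfx : Option (Int × Int × Int × Int)) : List (Int × Int) → List (Option (Int × Int × Int × Int))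
  | [] => []
  | p :: t => pvCombine pfx (pvStats t) :: pvCombos (pvCombine pfx (some (pvUnit p))) t

theorem pvCombine_none_right (a : Option (Int × Int × Int × Int)) : pvCombine a none = a := by
  cases a with
  | none => rfl
  | some s => obtain ⟨a0, a1, a2, a3⟩ := s; rfl

theorem pvCombine_assoc (a b c : Option (Int × Int × Int × Int)) :
    pvCombine (pvCombine a b) c = pvCombine a (pvCombine b c) := by
  cases a with
  | none => rfl
  | some sa =>
    cases b with
    | none => rfl
    | some sb =>
      cases c with
      | none => simp [pvCombine_none_right]
      | some sc =>
        obtain ⟨a0, a1, a2, a3⟩ := sa; obtain ⟨b0, b1, b2, b3⟩ := sb; obtain ⟨c0, c1, c2, c3⟩ := sc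
        simp [pvCombine, min_assoc, max_assoc]

theorem pvStats_foldl (l : List (Int × Int)) (s : Option (Int × Int × Int × Int)) :
    l.foldl (fun s p => pvCombine s (some (pvUnit p))) s = pvCombine s (pvStats l) := by
  induction l generalizing s with
  | nil => simp [pvStats, pvCombine_none_right]
  | cons p t ih =>
    have hcons : pvStats (p :: t) = pvCombine (some (pvUnit p)) (pvStats t) := by
      simp only [pvStats, List.foldl_cons]
      exact ih (pvCombine none (some (pvUnit p)))
    simp only [List.foldl_cons]
    rw [ih (pvCombine s (some (pvUnit p))), hcons, ← pvCombine_assoc]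

theorem pvStats_cons (p : Int × Int) (t : List (Int × Int)) :
    pvStats (p :: t) = pvCombine (some (pvUnit p)) (pvStats t) := by
  simp only [pvStats, List.foldl_cons]
  exact pvStats_foldl t (pvCombine none (some (pvUnit p)))

theorem pvStats_append (a b : List (Int × Int)) :
    pvStats (a ++ b) = pvCombine (pvStats a) (pvStats b) := by
  rw [pvStats, List.foldl_append, pvStats_foldl]
  rfl

-- running stats from a concrete quadruple: the four component folds
theorem pvStats_run (t : List (Int × Int)) (a b c d : Int) :
    t.foldl (fun s p => pvCombine s (some (pvUnit p))) (some (a, b, c, d)) =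
      some (t.foldl (fun m q => min m q.1) a, t.foldl (fun m q => max m q.1) b,
        t.foldl (fun m q => min m q.2) c, t.foldl (fun m q => max m q.2) d) := by
  induction t generalizing a b c d with
  | nil => rfl
  | cons q t ih =>
    simp only [List.foldl_cons, pvCombine, pvUnit]
    exact ih _ _ _ _

theorem pvStats_cons_eq (p : Int × Int) (t : List (Int × Int)) :
    pvStats (p :: t) = some (t.foldl (fun m q => min m q.1) p.1, t.foldl (fun m q => max m q.1) p.1,
      t.foldl (fun m q => min m q.2) p.2, t.foldl (fun m q => max m q.2) p.2) := by
  simp only [pvStats, List.foldl_cons]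
  exact pvStats_run t p.1 p.1 p.2 p.2

-- A's step at index |pre| of pre ++ p :: t equals the abstract best step on stats (pre ++ t)
theorem pvAStep_eq (pre t : List (Int × Int)) (p : Int × Int) (acc : Option Int) :
    pvAStep (pre ++ p :: t) acc (pre.length : Int) = pvBestStep acc (pvStats (pre ++ t)) := by
  have hrem : PySem.List.slice (pre ++ p :: t) none (some (pre.length : Int)) ++
      PySem.List.slice (pre ++ p :: t) (some ((pre.length : Int) + 1)) none = pre ++ t := by
    rw [PySem.List.slice_to_natCast,
      show ((pre.length : Int) + 1) = ((pre.length + 1 : Nat) : Int) by push_cast; ring,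
      PySem.List.slice_from_natCast, List.take_left]
    congr 1
    rw [show pre.length + 1 = pre.length + 1 from rfl, ← List.drop_drop, List.drop_left]
    rfl
  simp only [pvAStep, hrem]
  cases hr : pre ++ t with
  | nil => simp [pvStats, pvBestStep, PySem.List.min?, PySem.List.max?]
  | cons q rest =>
    simp only [List.map_cons, PySem.List.min?_id_cons, PySem.List.max?_id_cons, List.foldl_map]
    rw [pvStats_cons_eq]
    simp only [pvBestStep]
    -- the guarded 0 of A equals the plain product: in the degenerate cases the product is 0
    have harea : (if (rest.foldl (fun m q => min m q.1) q.1 == rest.foldl (fun m q => max m q.1) q.1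
          || rest.foldl (fun m q => min m q.2) q.2 == rest.foldl (fun m q => max m q.2) q.2) then (0 : Int)
        else (rest.foldl (fun m q => max m q.1) q.1 - rest.foldl (fun m q => min m q.1) q.1) *
          (rest.foldl (fun m q => max m q.2) q.2 - rest.foldl (fun m q => min m q.2) q.2)) =
        (rest.foldl (fun m q => max m q.1) q.1 - rest.foldl (fun m q => min m q.1) q.1) *
          (rest.foldl (fun m q => max m q.2) q.2 - rest.foldl (fun m q => min m q.2) q.2) := by
      split_ifs with h
      · rcases Bool.or_eq_true_iff.mp h with h1 | h1 <;>
          rw [beq_iff_eq] at h1 <;> rw [h1] <;> ring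
      · rfl
    rw [harea]

-- A's loop from index |pre| onwards computes the fold of pvBestStep over pvCombos
theorem pvA_loop (l pre : List (Int × Int)) (acc : Option Int) :
    (PySem.List.pyRange (pre.length : Int) (((pre ++ l).length : Nat) : Int) 1).foldl
      (pvAStep (pre ++ l)) acc = (pvCombos (pvStats pre) l).foldl pvBestStep acc := by
  induction l generalizing pre acc with
  | nil =>
    rw [PySem.List.pyRange_one_eq_nil (by simp)]
    rfl
  | cons p t ih =>
    have hlt : (pre.length : Int) < (((pre ++ p :: t).length : Nat) : Int) := by
      simp
    rw [PySem.List.pyRange_one_cons hlt, List.foldl_cons, pvAStep_eq pre t p acc]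
    have h2 := ih (pre ++ [p]) (pvBestStep acc (pvStats (pre ++ t)))
    simp only [List.append_assoc, List.singleton_append, List.length_append, List.length_cons,
      List.length_nil] at h2 ⊢
    push_cast at h2 ⊢
    rw [h2, pvCombos, List.foldl_cons]
    rw [pvStats_append pre t, pvStats_append pre [p]]
    rfl

theorem pvSufList_headD (l : List (Int × Int)) : (pvSufList l).headD none = pvStats l := by
  induction l with
  | nil => rfl
  | cons p t ih =>
    rw [pvSufList, List.foldr_cons, ← pvSufList]
    simp only [List.headD_cons]
    rw [ih, ← pvStats_cons]

theorem pvSufList_cons (p : Int × Int) (t : List (Int × Int)) :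
    pvSufList (p :: t) = pvStats (p :: t) :: pvSufList t := by
  rw [pvSufList, List.foldr_cons, ← pvSufList, pvSufList_headD, ← pvStats_cons]

theorem pvSufList_head_form (t : List (Int × Int)) :
    pvSufList t = pvStats t :: (pvSufList t).tail := by
  cases t with
  | nil => rfl
  | cons q t' => rw [pvSufList_cons]; rfl

-- B's loop computes the same fold of pvBestStep over pvCombos
theorem pvB_loop (l : List (Int × Int)) (pfx : Option (Int × Int × Int × Int)) (acc : Option Int) :
    ((l.zip (pvSufList l).tail).foldl pvBStep (acc, pfx)).1 =
      (pvCombos pfx l).foldl pvBestStep acc := by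
  induction l generalizing pfx acc with
  | nil => rfl
  | cons p t ih =>
    rw [pvSufList_cons]
    simp only [List.tail_cons]
    rw [pvSufList_head_form t, List.zip_cons_cons, List.foldl_cons]
    rw [show pvBStep (acc, pfx) (p, pvStats t) =
      (pvBestStep acc (pvCombine pfx (pvStats t)), pvCombine pfx (some (pvUnit p))) from rfl]
    rw [ih, pvCombos, List.foldl_cons]

-- ===== VERDICT (by name: the statement is the Claim_ definition above) =====
theorem min_area_excluding_one_point_spec : Claim_equal_min_area_excluding_one_point := by
  intro points _ _
  show ((PySem.List.pyRange 0 ((points.length : Nat) : Int) 1).foldl (pvAStep points) none).getD 0 =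
    (((points.zip (pvSufList points).tail).foldl pvBStep (none, none)).1).getD 0
  have ha := pvA_loop points [] none
  simp only [List.nil_append, List.length_nil, Nat.cast_zero] at ha
  rw [ha, show pvStats ([] : List (Int × Int)) = none from rfl, ← pvB_loop points none none]
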